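-- pv_equiv track=rewrite | github.com/freijo/hl7-anonymizer | src/parser/hl7_parser.py | tokenize_field_value
-- ===== SOURCE A (Python) =====
-- def _protect_escapes(text: str, escape_char: str) -> str:
--     """Replace HL7 escape sequences with placeholders so separators inside
--     escape sequences are not misinterpreted."""
--     result = text
--     esc = escape_char
--     for seq, placeholder in [
--         (f"{esc}F{esc}", "\x00F\x00"),
--         (f"{esc}S{esc}", "\x00S\x00"),
--         (f"{esc}T{esc}", "\x00T\x00"),
--         (f"{esc}R{esc}", "\x00R\x00"),
--         (f"{esc}E{esc}", "\x00E\x00"),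
--     ]:
--         result = result.replace(seq, placeholder)
--     return result
--
-- def _restore_escapes(text: str, escape_char: str) -> str:
--     """Restore placeholders back to real HL7 escape sequences."""
--     esc = escape_char
--     for placeholder, seq in [
--         ("\x00F\x00", f"{esc}F{esc}"),
--         ("\x00S\x00", f"{esc}S{esc}"),
--         ("\x00T\x00", f"{esc}T{esc}"),
--         ("\x00R\x00", f"{esc}R{esc}"),
--         ("\x00E\x00", f"{esc}E{esc}"),
--     ]:
--         text = text.replace(placeholder, seq)
--     return text
--
-- def tokenize_field_value(raw_value: str, encoding_chars: dict) -> list[tuple[str, str]]: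
--     """Tokenize a field value into (text, type) pairs for UI rendering.
--
--     Each separator character (^, ~, &) becomes its own token so the UI can
--     render individual clickable value widgets separated by styled separator labels.
--
--     Returns list of (text, token_type) where token_type is one of:
--       'value', 'component_sep', 'repetition_sep', 'subcomponent_sep'
--     """
--     if not raw_value:
--         return [("", "value")]
--
--     esc = encoding_chars.get("escape_char", "\\")
--     cs = encoding_chars.get("component_sep", "^")
--     rs = encoding_chars.get("repetition_sep", "~")
--     ss = encoding_chars.get("subcomponent_sep", "&")
--
--     protected = _protect_escapes(raw_value, esc)
--
--     tokens: list[tuple[str, str]] = []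
--     current: list[str] = []
--
--     for char in protected:
--         if char == rs:
--             tokens.append((_restore_escapes("".join(current), esc), "value"))
--             tokens.append((rs, "repetition_sep"))
--             current = []
--         elif char == cs:
--             tokens.append((_restore_escapes("".join(current), esc), "value"))
--             tokens.append((cs, "component_sep"))
--             current = []
--         elif char == ss:
--             tokens.append((_restore_escapes("".join(current), esc), "value"))
--             tokens.append((ss, "subcomponent_sep"))
--             current = []
--         else:
--             current.append(char)
--
--     tokens.append((_restore_escapes("".join(current), esc), "value"))
--     return tokens
-- ===== SOURCE B (Python) =====
-- def _protect_escapes(text: str, escape_char: str) -> str: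
--     result = text
--     esc = escape_char
--     for seq, placeholder in [
--         (f"{esc}F{esc}", "\x00F\x00"),
--         (f"{esc}S{esc}", "\x00S\x00"),
--         (f"{esc}T{esc}", "\x00T\x00"),
--         (f"{esc}R{esc}", "\x00R\x00"),
--         (f"{esc}E{esc}", "\x00E\x00"),
--     ]:
--         result = result.replace(seq, placeholder)
--     return result
--
-- def _restore_escapes(text: str, escape_char: str) -> str:
--     esc = escape_char
--     for placeholder, seq in [
--         ("\x00F\x00", f"{esc}F{esc}"),
--         ("\x00S\x00", f"{esc}S{esc}"),
--         ("\x00T\x00", f"{esc}T{esc}"),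
--         ("\x00R\x00", f"{esc}R{esc}"),
--         ("\x00E\x00", f"{esc}E{esc}"),
--     ]:
--         text = text.replace(placeholder, seq)
--     return text
--
-- def tokenize_field_value(raw_value: str, encoding_chars: dict) -> list[tuple[str, str]]:
--     if not raw_value:
--         return [("", "value")]
--
--     esc = encoding_chars.get("escape_char", "\\")
--     cs = encoding_chars.get("component_sep", "^")
--     rs = encoding_chars.get("repetition_sep", "~")
--     ss = encoding_chars.get("subcomponent_sep", "&")
--
--     protected = _protect_escapes(raw_value, esc)
--
--     # classification table; later entries overwrite earlier ones, so the
--     # rs > cs > ss precedence of coinciding separators is preserved.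
--     kind = {}
--     for sep, name in ((ss, "subcomponent_sep"), (cs, "component_sep"), (rs, "repetition_sep")):
--         if len(sep) == 1:
--             kind[sep] = name
--
--     tokens: list[tuple[str, str]] = []
--     start = 0
--     for i, ch in enumerate(protected):
--         name = kind.get(ch)
--         if name is not None:
--             tokens.append((_restore_escapes(protected[start:i], esc), "value"))
--             tokens.append((ch, name))
--             start = i + 1
--     tokens.append((_restore_escapes(protected[start:], esc), "value"))
--     return tokens
-- ===== Notes on version B (the rewrite author's own statement) =====
-- stated objective: alternative
-- what changed: Replaces the char-accumulating state machine (three duplicated branch bodies building up a 'current' char list) with a classification dict built once plus a single index/slice pass: separator positions are found by one dict lookup per character and value tokens are cut out of the protected string by slicing between separator positions.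
import Mathlib
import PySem

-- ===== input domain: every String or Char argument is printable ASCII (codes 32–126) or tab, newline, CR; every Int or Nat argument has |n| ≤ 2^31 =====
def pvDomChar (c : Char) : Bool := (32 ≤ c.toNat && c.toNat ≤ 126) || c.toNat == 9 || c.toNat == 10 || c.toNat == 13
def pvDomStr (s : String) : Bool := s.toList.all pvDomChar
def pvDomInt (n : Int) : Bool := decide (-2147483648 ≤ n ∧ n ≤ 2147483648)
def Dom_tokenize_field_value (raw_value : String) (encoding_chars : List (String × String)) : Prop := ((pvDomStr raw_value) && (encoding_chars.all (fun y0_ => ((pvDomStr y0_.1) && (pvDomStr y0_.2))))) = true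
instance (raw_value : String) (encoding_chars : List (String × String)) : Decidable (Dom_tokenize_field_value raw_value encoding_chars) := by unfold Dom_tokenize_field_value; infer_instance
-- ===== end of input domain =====

-- B replaces A's char-accumulating state machine by a classification dict plus one
-- index/slice pass (objective: alternative decomposition of the same O(n) task).

-- ===== PORT A =====
-- shared helpers of both Python versions (_protect_escapes / _restore_escapes):
-- chains of str.replace, ported with PySem.Str.replace
def pvProtect (text : String) (esc : String) : String :=
  let r1 := PySem.Str.replace text (esc ++ "F" ++ esc) "\x00F\x00"
  let r2 := PySem.Str.replace r1 (esc ++ "S" ++ esc) "\x00S\x00"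
  let r3 := PySem.Str.replace r2 (esc ++ "T" ++ esc) "\x00T\x00"
  let r4 := PySem.Str.replace r3 (esc ++ "R" ++ esc) "\x00R\x00"
  PySem.Str.replace r4 (esc ++ "E" ++ esc) "\x00E\x00"

def pvRestore (text : String) (esc : String) : String :=
  let r1 := PySem.Str.replace text "\x00F\x00" (esc ++ "F" ++ esc)
  let r2 := PySem.Str.replace r1 "\x00S\x00" (esc ++ "S" ++ esc)
  let r3 := PySem.Str.replace r2 "\x00T\x00" (esc ++ "T" ++ esc)
  let r4 := PySem.Str.replace r3 "\x00R\x00" (esc ++ "R" ++ esc)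
  PySem.Str.replace r4 "\x00E\x00" (esc ++ "E" ++ esc)

-- A's loop body ('for char in protected'); current : List Char models the list of
-- 1-char strings, ''.join(current) = String.ofList current
def pvAStep (rs cs ss esc : String)
    (st : List (String × String) × List Char) (c : Char) :
    List (String × String) × List Char :=
  if String.ofList [c] = rs then
    (st.1 ++ [(pvRestore (String.ofList st.2) esc, "value")] ++ [(rs, "repetition_sep")], [])
  else if String.ofList [c] = cs then
    (st.1 ++ [(pvRestore (String.ofList st.2) esc, "value")] ++ [(cs, "component_sep")], [])
  else if String.ofList [c] = ss then
    (st.1 ++ [(pvRestore (String.ofList st.2) esc, "value")] ++ [(ss, "subcomponent_sep")], [])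
  else
    (st.1, st.2 ++ [c])

def tokenize_field_value (raw_value : String) (encoding_chars : List (String × String)) : List (String × String) :=
  if raw_value = "" then [("", "value")]
  else
    let d := PySem.Dict.mk encoding_chars
    let esc := PySem.Dict.getD d "escape_char" "\\"
    let cs := PySem.Dict.getD d "component_sep" "^"
    let rs := PySem.Dict.getD d "repetition_sep" "~"
    let ss := PySem.Dict.getD d "subcomponent_sep" "&"
    let protectedS := pvProtect raw_value esc
    let st := protectedS.toList.foldl (pvAStep rs cs ss esc) ([], [])
    st.1 ++ [(pvRestore (String.ofList st.2) esc, "value")]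

-- ===== PORT B =====
-- the classification dict: later insertions overwrite earlier ones (rs > cs > ss)
def pvKind (rs cs ss : String) : PySem.Dict String String :=
  [(ss, "subcomponent_sep"), (cs, "component_sep"), (rs, "repetition_sep")].foldl
    (fun d p => if PySem.Str.len p.1 == 1 then d.insert p.1 p.2 else d)
    (PySem.Dict.mk [])

-- B's loop body over enumerate(protected); protected[start:i] is ported as the
-- exact Python slice on the code-point list (String.ofList ∘ PySem.List.slice)
def pvBStep (L : List Char) (kind : PySem.Dict String String) (esc : String)
    (st : List (String × String) × Int) (p : Int × Char) :
    List (String × String) × Int :=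
  match kind.get? (String.ofList [p.2]) with
  | some name =>
      (st.1 ++ [(pvRestore (String.ofList (PySem.List.slice L (some st.2) (some p.1))) esc, "value")]
            ++ [(String.ofList [p.2], name)], p.1 + 1)
  | none => st

def tokenize_field_value_alt (raw_value : String) (encoding_chars : List (String × String)) : List (String × String) :=
  if raw_value = "" then [("", "value")]
  else
    let d := PySem.Dict.mk encoding_chars
    let esc := PySem.Dict.getD d "escape_char" "\\"
    let cs := PySem.Dict.getD d "component_sep" "^"
    let rs := PySem.Dict.getD d "repetition_sep" "~"
    let ss := PySem.Dict.getD d "subcomponent_sep" "&"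
    let protectedS := pvProtect raw_value esc
    let kind := pvKind rs cs ss
    let st := (PySem.List.enumerate protectedS.toList 0).foldl (pvBStep protectedS.toList kind esc) ([], 0)
    st.1 ++ [(pvRestore (String.ofList (PySem.List.slice protectedS.toList (some st.2) none)) esc, "value")]

-- ===== PRECONDITION & SPEC =====
def Spec_tokenize_field_value (raw_value : String) (encoding_chars : List (String × String)) (out : List (String × String)) : Prop := out = tokenize_field_value_alt raw_value encoding_chars
instance (raw_value : String) (encoding_chars : List (String × String)) (out : List (String × String)) : Decidable (Spec_tokenize_field_value raw_value encoding_chars out) := by unfold Spec_tokenize_field_value; infer_instance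

-- ===== CLAIM (what is proved, stated in full; the proofs are below) =====
def Claim_equal_tokenize_field_value : Prop := ∀ (raw_value : String) (encoding_chars : List (String × String)), Dom_tokenize_field_value raw_value encoding_chars → Spec_tokenize_field_value raw_value encoding_chars (tokenize_field_value raw_value encoding_chars)

-- ===== LEMMAS AND PROOFS =====

-- one build step of the classification dict, described as a lookup
lemma pvKind_step (d : PySem.Dict String String) (s n k : String) :
    (if (PySem.Str.len s == 1) then d.insert s n else d).get? k =
      if k = s ∧ PySem.Str.len s = 1 then some n else d.get? k := by
  split_ifs with h1 h2 h3
  · obtain ⟨hk, _⟩ := h2; subst hk; exact PySem.Dict.get?_insert_self d k n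
  · exact PySem.Dict.get?_insert_of_ne d n (fun hk => h2 ⟨hk, by simpa using h1⟩)
  · exact absurd (by simpa using h3.2) (by simpa using h1)
  · rfl

-- the classification dict looked up at a one-character string is A's if-chain
lemma pvKind_get (rs cs ss : String) (c : Char) :
    (pvKind rs cs ss).get? (String.ofList [c]) =
      (if String.ofList [c] = rs then some "repetition_sep"
       else if String.ofList [c] = cs then some "component_sep"
       else if String.ofList [c] = ss then some "subcomponent_sep"
       else none) := by
  simp only [pvKind, List.foldl_cons, List.foldl_nil, pvKind_step]
  have h0 : (PySem.Dict.mk ([] : List (String × String))).get? (String.ofList [c]) = none := rfl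
  rw [h0]
  by_cases hrs : String.ofList [c] = rs
  · subst hrs; simp
  · by_cases hcs : String.ofList [c] = cs
    · subst hcs; simp [hrs]
    · by_cases hss : String.ofList [c] = ss
      · subst hss; simp [hrs, hcs]
      · simp [hrs, hcs, hss]

-- main loop invariant: A's 'current' is exactly the slice of the protected string
-- between B's 'start' and the current position
lemma pvLoop_eq (rs cs ss esc : String) (L : List Char) :
    ∀ (l : List Char) (start : Nat) (tk : List (String × String)) (cur : List Char),
      L.drop start = cur ++ l →
      (((PySem.List.enumerate l ((start + cur.length : Nat) : Int)).foldl
          (pvBStep L (pvKind rs cs ss) esc) (tk, (start : Int))).1 ++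
        [(pvRestore (String.ofList (PySem.List.slice L
          (some ((PySem.List.enumerate l ((start + cur.length : Nat) : Int)).foldl
            (pvBStep L (pvKind rs cs ss) esc) (tk, (start : Int))).2) none)) esc, "value")])
      = ((l.foldl (pvAStep rs cs ss esc) (tk, cur)).1 ++
        [(pvRestore (String.ofList (l.foldl (pvAStep rs cs ss esc) (tk, cur)).2) esc, "value")]) := by
  intro l
  induction l with
  | nil =>
    intro start tk cur h
    simp only [PySem.List.enumerate_nil, List.foldl_nil, PySem.List.slice_from_natCast]
    simp at h
    rw [h]
  | cons c t ih =>
    intro start tk cur h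
    have hd : L.drop (start + cur.length) = c :: t := by
      have h2 := congrArg (List.drop cur.length) h
      rw [List.drop_drop] at h2
      simpa using h2
    have hd1 : L.drop (start + cur.length + 1) = t := by
      have h3 := congrArg (List.drop 1) hd
      rw [List.drop_drop] at h3
      simpa using h3
    have hslice : PySem.List.slice L (some (start : Int)) (some ((start + cur.length : Nat) : Int)) = cur := by
      rw [PySem.List.slice_natCast, Nat.add_sub_cancel_left, h]
      simp
    have hcast : ((start + cur.length : Nat) : Int) + 1 = ((start + cur.length + 1 : Nat) : Int) := by
      push_cast; ring
    rw [PySem.List.enumerate_cons]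
    simp only [List.foldl_cons, pvBStep, pvAStep, pvKind_get]
    split_ifs with hrs hcs hss <;> dsimp only
    · rw [hslice, hrs, hcast]
      have := ih (start + cur.length + 1)
        (tk ++ [(pvRestore (String.ofList cur) esc, "value")] ++ [(rs, "repetition_sep")])
        [] (by simpa using hd1)
      simpa using this
    · rw [hslice, hcs, hcast]
      have := ih (start + cur.length + 1)
        (tk ++ [(pvRestore (String.ofList cur) esc, "value")] ++ [(cs, "component_sep")])
        [] (by simpa using hd1)
      simpa using this
    · rw [hslice, hss, hcast]
      have := ih (start + cur.length + 1)
        (tk ++ [(pvRestore (String.ofList cur) esc, "value")] ++ [(ss, "subcomponent_sep")])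
        [] (by simpa using hd1)
      simpa using this
    · rw [hcast]
      have := ih start tk (cur ++ [c]) (by simpa using h)
      simpa [Nat.add_assoc] using this

-- ===== VERDICT (by name: the statement is the Claim_ definition above) =====
theorem tokenize_field_value_spec : Claim_equal_tokenize_field_value := by
  intro raw enc _
  unfold Spec_tokenize_field_value tokenize_field_value tokenize_field_value_alt
  by_cases h : raw = ""
  · simp [h]
  · simp only [h, if_false]
    have := pvLoop_eq (PySem.Dict.getD (PySem.Dict.mk enc) "repetition_sep" "~")
      (PySem.Dict.getD (PySem.Dict.mk enc) "component_sep" "^")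
      (PySem.Dict.getD (PySem.Dict.mk enc) "subcomponent_sep" "&")
      (PySem.Dict.getD (PySem.Dict.mk enc) "escape_char" "\\")
      (pvProtect raw (PySem.Dict.getD (PySem.Dict.mk enc) "escape_char" "\\")).toList
      (pvProtect raw (PySem.Dict.getD (PySem.Dict.mk enc) "escape_char" "\\")).toList
      0 [] [] (by simp)
    simpa using this.symm
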